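-- pv_equiv track=rewrite | github.com/wangsun39/leetcode | allcode/LCCUP/LCP73adventureCamp.py | adventureCamp
-- ===== SOURCE A (Python) =====
-- from typing import List
--
-- def adventureCamp(expeditions: List[str]) -> int:
--     s = set(expeditions[0].split('->'))
--     def f(exp):
--         if len(exp) == 0: return 0
--         res = 0
--         l = exp.split('->')
--         for x in l:
--             if x not in s:
--                 res += 1
--                 s.add(x)
--         return res
--
--     mx = 0
--     ans = -1
--     for i, x in enumerate(expeditions[1:], 1):
--         cur = f(x)
--         if mx < cur:
--             mx = cur
--             ans = i
--     return ans
-- ===== SOURCE B (Python) =====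
-- from typing import List
--
-- def adventureCamp(expeditions: List[str]) -> int:
--     # attribute each camp to the expedition where it first appears, histogram, then argmax
--     first = {}
--     for i, exp in enumerate(expeditions):
--         if i == 0 or exp:
--             for camp in exp.split('->'):
--                 first.setdefault(camp, i)
--     cnt = {}
--     for i in first.values():
--         cnt[i] = cnt.get(i, 0) + 1
--     mx = 0
--     ans = -1
--     for i in range(1, len(expeditions)):
--         c = cnt.get(i, 0)
--         if mx < c:
--             mx = c
--             ans = i
--     return ans
-- ===== Notes on version B (the rewrite author's own statement) =====
-- stated objective: alternative
-- what changed: B inverts the computation: instead of A's running seen-set with a per-expedition new-camp counter and an inline max, B builds a camp-to-first-expedition-index map with setdefault, histograms those indices into a count dict, and finally argmaxes over range(1, len(expeditions)) with dict lookups.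
import Mathlib
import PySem

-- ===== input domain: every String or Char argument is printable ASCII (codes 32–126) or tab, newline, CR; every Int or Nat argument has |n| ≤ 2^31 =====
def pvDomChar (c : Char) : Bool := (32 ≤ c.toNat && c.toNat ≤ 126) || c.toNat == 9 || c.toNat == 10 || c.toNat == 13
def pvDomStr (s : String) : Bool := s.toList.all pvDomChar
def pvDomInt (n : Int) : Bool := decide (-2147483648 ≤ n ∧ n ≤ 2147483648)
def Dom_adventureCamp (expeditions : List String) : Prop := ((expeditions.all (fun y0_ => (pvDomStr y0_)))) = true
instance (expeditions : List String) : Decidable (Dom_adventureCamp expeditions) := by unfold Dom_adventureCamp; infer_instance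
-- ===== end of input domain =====

-- B inverts A's running seen-set + inline max: it maps each camp to its first-occurrence expedition index,
-- histograms those indices into a dict, and argmaxes over the index range; same cost, different algorithm shape.


-- exp.split('->'): sep is the non-empty literal "->", so split? never returns none
def pvSplit (s : String) : List String := (PySem.Str.split? s "->").getD []

-- ===== PORT A =====
-- the body of A's closure f (reads and returns the mutated set s)
def pvF (s : PySem.Set String) (exp : String) : Int × PySem.Set String :=
  if PySem.Str.len exp = 0 then (0, s)
  else (pvSplit exp).foldl
    (fun acc x => if !PySem.Set.contains acc.2 x then (acc.1 + 1, PySem.Set.add acc.2 x) else acc)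
    ((0 : Int), s)

-- A's main loop body: state (s, mx, ans), element (i, x)
def pvStepA (st : PySem.Set String × Int × Int) (ix : Int × String) : PySem.Set String × Int × Int :=
  let cur := pvF st.1 ix.2
  if st.2.1 < cur.1 then (cur.2, cur.1, ix.1) else (cur.2, st.2.1, st.2.2)

def adventureCamp (expeditions : List String) : Int :=
  let s0 : PySem.Set String := PySem.Set.ofList (pvSplit ((PySem.List.pyGet? expeditions 0).getD ""))
  (((PySem.List.enumerate (expeditions.drop 1) 1).foldl pvStepA (s0, 0, -1)).2).2

-- ===== PORT B =====
-- first pass: camp -> index of the expedition where it first appears (expedition 0 always split, later ones only if nonempty)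
def pvFirst (expeditions : List String) : PySem.Dict String Int :=
  (PySem.List.enumerate expeditions 0).foldl
    (fun d ix =>
      if ix.1 = 0 ∨ ix.2 ≠ "" then
        (pvSplit ix.2).foldl (fun d camp => d.setdefault camp ix.1) d
      else d)
    PySem.Dict.empty

-- second pass: histogram of the first-occurrence indices
def pvCnt (vals : List Int) : PySem.Dict Int Int :=
  vals.foldl (fun d i => d.insert i (d.getD i 0 + 1)) PySem.Dict.empty

def adventureCamp_alt (expeditions : List String) : Int :=
  let first := pvFirst expeditions
  let cnt := pvCnt first.values
  ((PySem.List.pyRange 1 (PySem.List.len expeditions) 1).foldl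
    (fun st i =>
      let c := cnt.getD i 0
      if st.1 < c then (c, i) else st)
    ((0 : Int), (-1 : Int))).2

-- ===== PRECONDITION & SPEC =====
-- Pre_ excludes only the empty list, on which Python A raises IndexError at expeditions[0]
def Pre_adventureCamp (expeditions : List String) : Prop := expeditions ≠ []
instance (expeditions : List String) : Decidable (Pre_adventureCamp expeditions) := by unfold Pre_adventureCamp; infer_instance
def pvWitness_adventureCamp : List String := (["leet->code", "leet->code->camp", ""])

def Spec_adventureCamp (expeditions : List String) (out : Int) : Prop := out = adventureCamp_alt expeditions
instance (expeditions : List String) (out : Int) : Decidable (Spec_adventureCamp expeditions out) := by unfold Spec_adventureCamp; infer_instance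

-- ===== CLAIM (what is proved, stated in full; the proofs are below) =====
def Claim_equal_adventureCamp : Prop := ∀ (expeditions : List String), Dom_adventureCamp expeditions → Pre_adventureCamp expeditions → Spec_adventureCamp expeditions (adventureCamp expeditions)

-- ===== LEMMAS AND PROOFS =====

-- proof-side: the per-expedition (new-camp count, updated seen-set) pair, over an already-split camp list
def pvCountL (s : PySem.Set String) (l : List String) : Int × PySem.Set String :=
  l.foldl (fun acc x => if !PySem.Set.contains acc.2 x then (acc.1 + 1, PySem.Set.add acc.2 x) else acc)
    ((0 : Int), s)

-- proof-side: the per-expedition new-camp count table for the expeditions after the first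
def pvCounts (s : PySem.Set String) : List String → List Int
  | [] => []
  | exp :: rest =>
    if exp = "" then 0 :: pvCounts s rest
    else (pvCountL s (pvSplit exp)).1 :: pvCounts (pvCountL s (pvSplit exp)).2 rest

-- proof-side: argmax step over (index, count) pairs, state (best, ans)
def pvStepB (ba : Int × Int) (ic : Int × Int) : Int × Int :=
  if ba.1 < ic.2 then (ic.2, ic.1) else ba

-- proof-side: total count contributed to value j by a count table starting at index i
def pvContrib : List Int → Int → Int → Int
  | [], _, _ => 0
  | c :: rest, i, j => (if j = i then c else 0) + pvContrib rest (i + 1) j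

lemma pv_len_zero_iff (s : String) : PySem.Str.len s = 0 ↔ s = "" := by simp

-- A's fused loop = argmax over the count table, for any start state
lemma pv_main (tail : List String) :
    ∀ (s : PySem.Set String) (i mx ans : Int),
      (((PySem.List.enumerate tail i).foldl pvStepA (s, mx, ans)).2).2
        = ((PySem.List.enumerate (pvCounts s tail) i).foldl pvStepB (mx, ans)).2 := by
  induction tail with
  | nil => intro s i mx ans; simp [pvCounts]
  | cons exp rest ih =>
    intro s i mx ans
    by_cases h : exp = ""
    · subst h
      have h0 : PySem.Str.len "" = 0 := by simp
      simp only [pvCounts, if_pos, PySem.List.enumerate_cons, List.foldl_cons]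
      have hA : pvStepA (s, mx, ans) (i, "") =
          (s, pvStepB (mx, ans) (i, (0 : Int))) := by
        simp only [pvStepA, pvStepB, pvF, h0, if_pos]
        split_ifs <;> simp
      rw [hA]
      rcases hb : pvStepB (mx, ans) (i, (0 : Int)) with ⟨mx', ans'⟩
      exact ih s (i + 1) mx' ans'
    · have h0 : ¬ PySem.Str.len exp = 0 := fun hc => h ((pv_len_zero_iff exp).mp hc)
      simp only [pvCounts, h, if_neg, PySem.List.enumerate_cons, List.foldl_cons, not_false_iff]
      have hA : pvStepA (s, mx, ans) (i, exp) =
          ((pvCountL s (pvSplit exp)).2, pvStepB (mx, ans) (i, (pvCountL s (pvSplit exp)).1)) := by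
        have hf : pvF s exp = pvCountL s (pvSplit exp) := by
          simp only [pvF, pvCountL, h0, if_neg, not_false_iff]
        simp only [pvStepA, hf, pvStepB]
        split_ifs <;> simp
      rw [hA]
      rcases hb : pvStepB (mx, ans) (i, (pvCountL s (pvSplit exp)).1) with ⟨mx', ans'⟩
      exact ih (pvCountL s (pvSplit exp)).2 (i + 1) mx' ans'

-- pvCountL with a shifted count accumulator
lemma pvCountL_shift (l : List String) :
    ∀ (s : PySem.Set String) (c : Int),
      l.foldl (fun acc x => if !PySem.Set.contains acc.2 x then (acc.1 + 1, PySem.Set.add acc.2 x) else acc) (c, s)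
        = (c + (pvCountL s l).1, (pvCountL s l).2) := by
  induction l with
  | nil => intro s c; simp [pvCountL]
  | cons x l ih =>
    intro s c
    by_cases hm : PySem.Set.contains s x
    · simp only [pvCountL, List.foldl_cons, hm, Bool.not_true, if_neg, Bool.false_eq_true,
        not_false_iff]
      exact ih s c
    · have hm' : PySem.Set.contains s x = false := by simpa using hm
      simp only [pvCountL, List.foldl_cons, hm', Bool.not_false, if_pos]
      rw [ih (PySem.Set.add s x) (c + 1), ih (PySem.Set.add s x) (0 + 1)]
      simp only [Prod.mk.injEq, and_true]
      ring

lemma pvCountL_cons_mem (s : PySem.Set String) (x : String) (l : List String)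
    (h : PySem.Set.contains s x = true) : pvCountL s (x :: l) = pvCountL s l := by
  simp only [pvCountL, List.foldl_cons, h, Bool.not_true, Bool.false_eq_true, if_neg,
    not_false_iff]

lemma pvCountL_cons_not_mem (s : PySem.Set String) (x : String) (l : List String)
    (h : PySem.Set.contains s x = false) :
    pvCountL s (x :: l) = (1 + (pvCountL (PySem.Set.add s x) l).1, (pvCountL (PySem.Set.add s x) l).2) := by
  simp only [pvCountL, List.foldl_cons, h, Bool.not_false, if_pos]
  have := pvCountL_shift l (PySem.Set.add s x) (0 + 1)
  simpa [pvCountL] using this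

-- the setdefault loop over one camp list: keys follow pvCountL's set, value counts grow by pvCountL's count at value i
lemma pv_inner (l : List String) :
    ∀ (d : PySem.Dict String Int) (i : Int),
      (l.foldl (fun d camp => d.setdefault camp i) d).keys = (pvCountL d.keys l).2
      ∧ ∀ j : Int, ((l.foldl (fun d camp => d.setdefault camp i) d).values.count j : Int)
          = (d.values.count j : Int) + (if j = i then (pvCountL d.keys l).1 else 0) := by
  induction l with
  | nil => intro d i; refine ⟨by simp [pvCountL], fun j => by simp [pvCountL]⟩
  | cons x l ih =>
    intro d i
    by_cases hc : d.contains x = true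
    · have hk : PySem.Set.contains d.keys x = true := by
        simp only [PySem.Set.contains_eq_listContains, List.contains_eq_mem, decide_eq_true_iff]
        exact (PySem.Dict.contains_iff_mem_keys d x).mp hc
      have hsd : d.setdefault x i = d := PySem.Dict.setdefault_of_contains d i hc
      simp only [List.foldl_cons, hsd, pvCountL_cons_mem d.keys x l hk]
      exact ih d i
    · have hc' : d.contains x = false := by simpa using hc
      have hxk : x ∉ d.keys := fun hm => hc ((PySem.Dict.contains_iff_mem_keys d x).mpr hm)
      have hk : PySem.Set.contains d.keys x = false := by
        simp only [PySem.Set.contains_eq_listContains, List.contains_eq_mem, decide_eq_false_iff_not]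
        exact hxk
      have hsd : d.setdefault x i = d.insert x i := PySem.Dict.setdefault_of_not_contains d i hc'
      have hkeys : (d.insert x i).keys = d.keys ++ [x] :=
        PySem.Dict.keys_insert_of_not_contains d i hc'
      have hitems : (d.insert x i).items = d.items ++ [(x, i)] :=
        PySem.Dict.items_insert_of_not_contains d i hc'
      have hvals : (d.insert x i).values = d.values ++ [i] := by
        simp only [PySem.Dict.values, hitems, List.map_append, List.map_cons, List.map_nil]
      have hadd : PySem.Set.add d.keys x = d.keys ++ [x] := PySem.Set.add_of_not_mem hxk
      obtain ⟨ihk, ihv⟩ := ih (d.insert x i) i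
      rw [pvCountL_cons_not_mem d.keys x l hk]
      refine ⟨?_, fun j => ?_⟩
      · simpa only [List.foldl_cons, hsd, hkeys, hadd] using ihk
      · have := ihv j
        simp only [List.foldl_cons, hsd]
        rw [this, hvals, hkeys, ← hadd]
        by_cases hj : j = i
        · subst hj
          simp [List.count_append]
          ring
        · simp [List.count_append, hj, List.count_singleton]
          intro hij
          exact absurd hij.symm hj

-- the set component of pvCountL is Set.update
lemma pvCountL_snd (l : List String) :
    ∀ (s : PySem.Set String), (pvCountL s l).2 = PySem.Set.update s l := by
  induction l with
  | nil => intro s; simp [pvCountL, PySem.Set.update_nil]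
  | cons x l ih =>
    intro s
    rw [PySem.Set.update_cons]
    by_cases hm : x ∈ s
    · have h : PySem.Set.contains s x = true := by
        simp [PySem.Set.contains_eq_listContains, hm]
      rw [pvCountL_cons_mem s x l h, PySem.Set.add_of_mem hm]
      exact ih s
    · have h : PySem.Set.contains s x = false := by
        simp [PySem.Set.contains_eq_listContains, hm]
      rw [pvCountL_cons_not_mem s x l h]
      exact ih (PySem.Set.add s x)

lemma pvContrib_eq_zero_of_lt (L : List Int) :
    ∀ (i j : Int), j < i → pvContrib L i j = 0 := by
  induction L with
  | nil => intro i j _; rfl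
  | cons c rest ih =>
    intro i j h
    simp only [pvContrib]
    rw [if_neg (by omega), ih (i + 1) j (by omega)]
    ring

lemma pvContrib_get (L : List Int) :
    ∀ (i : Int) (k : Nat) (hk : k < L.length), pvContrib L i (i + k) = L[k] := by
  induction L with
  | nil => intro i k hk; simp at hk
  | cons c rest ih =>
    intro i k hk
    cases k with
    | zero =>
      simp only [pvContrib, Nat.cast_zero, add_zero]
      rw [pvContrib_eq_zero_of_lt rest (i + 1) i (by omega)]
      simp
    | succ k =>
      simp only [pvContrib]
      rw [if_neg (by push_cast; omega)]
      have : i + ((k : Nat) + 1 : Nat) = (i + 1) + (k : Nat) := by push_cast; ring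
      rw [this, ih (i + 1) k (by simpa using hk)]
      simp

-- B's first-pass loop over the later expeditions: value counts = old counts + contributions of the count table
lemma pv_outer (tail : List String) :
    ∀ (d : PySem.Dict String Int) (i : Int), 1 ≤ i →
      ∀ j : Int,
      (((PySem.List.enumerate tail i).foldl
          (fun d ix =>
            if ix.1 = 0 ∨ ix.2 ≠ "" then
              (pvSplit ix.2).foldl (fun d camp => d.setdefault camp ix.1) d
            else d)
          d).values.count j : Int)
        = (d.values.count j : Int) + pvContrib (pvCounts d.keys tail) i j := by
  induction tail with
  | nil => intro d i _ j; simp [pvCounts, pvContrib]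
  | cons exp rest ih =>
    intro d i hi j
    rw [PySem.List.enumerate_cons, List.foldl_cons]
    by_cases h : exp = ""
    · have hg : ¬ (i = 0 ∨ exp ≠ "") := by
        rintro (h0 | hne)
        · omega
        · exact hne h
      rw [if_neg hg]
      simp only [pvCounts, h, if_pos, pvContrib]
      rw [ih d (i + 1) (by omega) j]
      simp
    · have hg : i = 0 ∨ exp ≠ "" := Or.inr h
      rw [if_pos hg]
      obtain ⟨hk, hv⟩ := pv_inner (pvSplit exp) d i
      simp only [pvCounts, h, if_neg, not_false_iff, pvContrib]
      rw [ih _ (i + 1) (by omega) j, hv j, hk]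
      ring

-- the histogram dict looks up to a plain count
lemma pvCnt_getD (vals : List Int) (j : Int) :
    (pvCnt vals).getD j 0 = (vals.count j : Int) := by
  simp only [pvCnt]
  rw [PySem.Dict.getD_foldl_insert_add_one]
  simp

-- B's argmax loop over the index range = the pvStepB fold over the enumerated count table
lemma pv_argmax (cnt : PySem.Dict Int Int) (L : List Int) :
    ∀ (i mx ans : Int),
      (∀ (k : Nat), k < L.length → cnt.getD (i + k) 0 = L[k]!) →
      ((PySem.List.pyRange i (i + L.length) 1).foldl
          (fun st x => let c := cnt.getD x 0; if st.1 < c then (c, x) else st) (mx, ans)).2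
        = ((PySem.List.enumerate L i).foldl pvStepB (mx, ans)).2 := by
  induction L with
  | nil => intro i mx ans _; simp
  | cons c rest ih =>
    intro i mx ans h
    have hlt : i < i + ((c :: rest).length : Int) := by simp
    rw [PySem.List.pyRange_one_cons hlt, List.foldl_cons, PySem.List.enumerate_cons,
      List.foldl_cons]
    have h0 : cnt.getD i 0 = c := by
      have := h 0 (by simp)
      simpa using this
    have hstep : (let cc := cnt.getD i 0; if mx < cc then (cc, i) else (mx, ans))
        = pvStepB (mx, ans) (i, c) := by
      simp only [pvStepB, h0]
    rw [hstep]
    have harith : i + ((c :: rest).length : Int) = (i + 1) + (rest.length : Int) := by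
      simp; ring
    rw [harith]
    rcases hb : pvStepB (mx, ans) (i, c) with ⟨mx', ans'⟩
    exact ih (i + 1) mx' ans' (fun k hk => by
      have := h (k + 1) (by simpa using Nat.succ_lt_succ hk)
      simp only [List.getElem!_cons_succ] at this ⊢
      rw [← this]
      congr 1
      push_cast
      ring)

lemma pvCounts_length (tail : List String) :
    ∀ s, (pvCounts s tail).length = tail.length := by
  induction tail with
  | nil => intro s; rfl
  | cons exp rest ih =>
    intro s
    by_cases h : exp = "" <;> simp [pvCounts, h, ih]

-- ===== VERDICT (by name: the statement is the Claim_ definition above) =====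
theorem adventureCamp_spec : Claim_equal_adventureCamp := by
  intro expeditions _ hpre
  cases expeditions with
  | nil => exact absurd rfl hpre
  | cons e0 tail =>
    unfold Spec_adventureCamp adventureCamp adventureCamp_alt
    -- A's side
    rw [PySem.List.pyGet?_zero_cons]
    simp only [Option.getD_some, List.drop_succ_cons, List.drop_zero]
    -- the seed dict of B
    have hguard : (0 : Int) = 0 ∨ e0 ≠ "" := Or.inl rfl
    have hfirst : pvFirst (e0 :: tail)
        = (PySem.List.enumerate tail 1).foldl
            (fun d ix =>
              if ix.1 = 0 ∨ ix.2 ≠ "" then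
                (pvSplit ix.2).foldl (fun d camp => d.setdefault camp ix.1) d
              else d)
            ((pvSplit e0).foldl (fun d camp => d.setdefault camp 0) PySem.Dict.empty) := by
      unfold pvFirst
      rw [PySem.List.enumerate_cons, List.foldl_cons, if_pos hguard]
      norm_num
    set d0 : PySem.Dict String Int :=
      (pvSplit e0).foldl (fun d camp => d.setdefault camp 0) PySem.Dict.empty with hd0
    obtain ⟨hd0k, hd0v⟩ := pv_inner (pvSplit e0) PySem.Dict.empty 0
    have hkeys0 : d0.keys = PySem.Set.ofList (pvSplit e0) := by
      rw [hd0, hd0k, pvCountL_snd]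
      have : (PySem.Dict.empty : PySem.Dict String Int).keys = ([] : List String) := rfl
      rw [this, PySem.Set.update_nil_left]
    -- B = argmax fold over the count table
    rw [pv_main tail (PySem.Set.ofList (pvSplit e0)) 1 0 (-1), hfirst]
    have hlen : PySem.List.len (e0 :: tail)
        = 1 + ((pvCounts (PySem.Set.ofList (pvSplit e0)) tail).length : Int) := by
      rw [PySem.List.len_eq, pvCounts_length]
      simp; ring
    rw [hlen]
    refine (pv_argmax _ (pvCounts (PySem.Set.ofList (pvSplit e0)) tail) 1 0 (-1)
      (fun k hk => ?_)).symm
    -- the dict lookup at index 1+k is the k-th table entry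
    rw [pvCnt_getD]
    have hcount := pv_outer tail d0 1 (le_refl 1) (1 + (k : Int))
    rw [hkeys0] at hcount
    have hz : ((d0.values.count (1 + (k : Int)) : Int)) = 0 := by
      have := hd0v (1 + (k : Int))
      rw [← hd0] at this
      rw [this, if_neg (by omega)]
      simp [PySem.Dict.empty, PySem.Dict.values]
    rw [hcount, hz, zero_add, pvContrib_get _ 1 k hk]
    exact (getElem!_pos (pvCounts (PySem.Set.ofList (pvSplit e0)) tail) k hk).symm
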